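-- pv_equiv track=rewrite | github.com/SiegeLordEx/vizier | vizier/pyvizier/shared/common.py | _parse
-- ===== SOURCE A (Python) =====
-- from typing import Iterable, List, Optional, Tuple, TypeVar, Union, Type
--
-- def _parse(arg: str) -> Tuple[str, ...]:
--   """Parses an encoded namespace string into a namespace tuple."""
--   # The algorithm is that we split on all colons, both escaped and unescaped.
--   fragments = arg.split(':')
--   # Then, we walk through the list of fragments and join back together the
--   # colons that were preceeded by an escape character, dropping the escape
--   # character as we go.
--   output = []
--   join = False
--   for frag in fragments:
--     if join and frag and frag[-1] == '\\':
--       output[-1] += ':' + frag[:-1]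
--       join = True
--     elif join:  # Doesn't end in an escape character.
--       output[-1] += ':' + frag
--       join = False
--     elif frag and frag[-1] == '\\':  # Don't join to previous.
--       output.append(frag[:-1])
--       join = True
--     else:  # Don't join to previous and doesn't end in an escape.
--       output.append(frag)
--       join = False
--   return tuple(output)
-- ===== SOURCE B (Python) =====
-- def _parse(arg):
--   """Parses an encoded namespace string into a namespace tuple.
--
--   Single left-to-right character scan with lookahead: a backslash immediately
--   before a colon escapes it; a lone backslash at the end of the string is
--   dropped; an unescaped colon separates components.
--   """
--   components = []
--   cur = []
--   i = 0
--   n = len(arg)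
--   while i < n:
--     c = arg[i]
--     if c == '\\' and i + 1 == n:
--       i += 1  # lone trailing backslash is dropped
--     elif c == '\\' and arg[i + 1] == ':':
--       cur.append(':')
--       i += 2
--     elif c == ':':
--       components.append(''.join(cur))
--       cur = []
--       i += 1
--     else:
--       cur.append(c)
--       i += 1
--   components.append(''.join(cur))
--   return tuple(components)
-- ===== Notes on version B (the rewrite author's own statement) =====
-- stated objective: alternative
-- what changed: Replaced split-on-all-colons followed by a join-back fold with last-element mutation by a single left-to-right character scan with one-character lookahead that consumes backslash-colon escapes directly and flushes components at unescaped colons.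
import Mathlib
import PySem

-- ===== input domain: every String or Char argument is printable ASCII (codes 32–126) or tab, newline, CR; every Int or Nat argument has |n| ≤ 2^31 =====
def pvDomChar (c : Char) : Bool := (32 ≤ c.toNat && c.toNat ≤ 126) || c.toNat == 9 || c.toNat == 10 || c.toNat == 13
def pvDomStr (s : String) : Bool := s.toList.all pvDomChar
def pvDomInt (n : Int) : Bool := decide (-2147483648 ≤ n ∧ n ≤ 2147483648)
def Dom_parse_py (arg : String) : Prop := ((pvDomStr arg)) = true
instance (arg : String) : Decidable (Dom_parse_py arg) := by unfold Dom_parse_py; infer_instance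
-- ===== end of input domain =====

-- B replaces A's split-then-rejoin fold by a single character scan with lookahead (alternative decomposition, same cost; same return value).

-- ===== PORT A =====
-- output[-1] += s  (join=True implies output nonempty, so the [] case is unreachable)
def pvUpdLast (out : List (List Char)) (s : List Char) : List (List Char) :=
  out.dropLast ++ [(out.getLast?.getD []) ++ s]

-- one iteration of A's 'for frag in fragments' loop; state = (output, join)
def parseA_step (st : List (List Char) × Bool) (frag : List Char) : List (List Char) × Bool :=
  let output := st.1
  let join := st.2
  if join && !frag.isEmpty && (PySem.List.pyGet? frag (-1) == some '\\') then
    (pvUpdLast output (':' :: PySem.List.slice frag none (some (-1))), true)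
  else if join then
    (pvUpdLast output (':' :: frag), false)
  else if !frag.isEmpty && (PySem.List.pyGet? frag (-1) == some '\\') then
    (output ++ [PySem.List.slice frag none (some (-1))], true)
  else
    (output ++ [frag], false)

def parse_py (arg : String) : List String :=
  let fragments := PySem.Chars.splitOn arg.toList [':']
  ((fragments.foldl parseA_step ([], false)).1).map String.ofList

-- ===== PORT B =====
-- Source B's while loop: cs = remaining chars, cur = current component, comps = finished components
def parse_py_alt_go : List Char → List Char → List (List Char) → List (List Char)
  | [], cur, comps => comps ++ [cur]
  | ['\\'], cur, comps => comps ++ [cur]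
  | '\\' :: ':' :: rest, cur, comps => parse_py_alt_go rest (cur ++ [':']) comps
  | ':' :: rest, cur, comps => parse_py_alt_go rest [] (comps ++ [cur])
  | c :: rest, cur, comps => parse_py_alt_go rest (cur ++ [c]) comps
  termination_by cs _ _ => cs.length

def parse_py_alt (arg : String) : List String :=
  (parse_py_alt_go arg.toList [] []).map String.ofList

-- ===== PRECONDITION & SPEC =====
def Spec_parse_py (arg : String) (out : List String) : Prop := out = parse_py_alt arg
instance (arg : String) (out : List String) : Decidable (Spec_parse_py arg out) := by unfold Spec_parse_py; infer_instance

-- ===== CLAIM (what is proved, stated in full; the proofs are below) =====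
def Claim_equal_parse_py : Prop := ∀ (arg : String), Dom_parse_py arg → Spec_parse_py arg (parse_py arg)

-- ===== LEMMAS AND PROOFS =====

-- plain recursive split-on-':' used as the common reference shape
def pvConsHead (p : List Char) : List (List Char) → List (List Char)
  | [] => [p]
  | f :: fs => (p ++ f) :: fs

def pvSplitCh : List Char → List (List Char)
  | [] => [[]]
  | c :: rest => if c = ':' then [] :: pvSplitCh rest else pvConsHead [c] (pvSplitCh rest)

theorem pvSplitCh_ne_nil (l : List Char) : pvSplitCh l ≠ [] := by
  cases l with
  | nil => simp [pvSplitCh]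
  | cons c rest =>
    simp only [pvSplitCh]
    split
    · simp
    · cases h : pvSplitCh rest <;> simp [pvConsHead]

theorem pvConsHead_nil (xs : List (List Char)) (h : xs ≠ []) : pvConsHead [] xs = xs := by
  cases xs with
  | nil => exact absurd rfl h
  | cons f fs => simp [pvConsHead]

theorem pvConsHead_append (p q : List Char) (xs : List (List Char)) :
    pvConsHead (p ++ q) xs = pvConsHead p (pvConsHead q xs) := by
  cases xs <;> simp [pvConsHead]

theorem splitOn_go_spec : ∀ (fuel : Nat) (l cur : List Char) (acc : List (List Char)),
    l.length < fuel →
    PySem.Chars.splitOn.go [':'] fuel l cur acc =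
      acc.reverse ++ pvConsHead cur.reverse (pvSplitCh l) := by
  intro fuel
  induction fuel with
  | zero => intro l cur acc h; omega
  | succ k ih =>
    intro l cur acc h
    cases l with
    | nil =>
      rw [PySem.Chars.splitOn.go.eq_def]
      simp [pvSplitCh, pvConsHead]
    | cons c rest =>
      by_cases hc : c = ':'
      · subst hc
        rw [show PySem.Chars.splitOn.go [':'] (k+1) (':' :: rest) cur acc =
              PySem.Chars.splitOn.go [':'] k rest [] (cur.reverse :: acc) by
            rw [PySem.Chars.splitOn.go.eq_def]; simp [List.isPrefixOf]]
        rw [ih rest [] (cur.reverse :: acc) (by simpa using Nat.lt_of_succ_lt_succ h)]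
        rw [show pvSplitCh (':' :: rest) = [] :: pvSplitCh rest by simp [pvSplitCh]]
        rw [show ([] : List Char).reverse = [] from rfl,
            pvConsHead_nil _ (pvSplitCh_ne_nil rest)]
        simp [pvConsHead]
      · rw [show PySem.Chars.splitOn.go [':'] (k+1) (c :: rest) cur acc =
              PySem.Chars.splitOn.go [':'] k rest (c :: cur) acc by
            rw [PySem.Chars.splitOn.go.eq_def]; simp [List.isPrefixOf, Ne.symm hc]]
        rw [ih rest (c :: cur) acc (by simpa using Nat.lt_of_succ_lt_succ h)]
        rw [show pvSplitCh (c :: rest) = pvConsHead [c] (pvSplitCh rest) by simp [pvSplitCh, hc]]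
        rw [show (c :: cur).reverse = cur.reverse ++ [c] by simp]
        rw [pvConsHead_append]

theorem splitOn_eq_pvSplitCh (l : List Char) :
    PySem.Chars.splitOn l [':'] = pvSplitCh l := by
  show PySem.Chars.splitOn.go [':'] (l.length + 1) l [] [] = pvSplitCh l
  rw [splitOn_go_spec (l.length + 1) l [] [] (by omega)]
  simp [pvConsHead_nil _ (pvSplitCh_ne_nil l)]

theorem pvSplitCh_no_colon (l : List Char) (h : ':' ∉ l) : pvSplitCh l = [l] := by
  induction l with
  | nil => rfl
  | cons c rest ih =>
    have hc : c ≠ ':' := fun hh => h (hh ▸ List.mem_cons_self)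
    have hr : ':' ∉ rest := fun hh => h (List.mem_cons_of_mem _ hh)
    simp [pvSplitCh, hc, ih hr, pvConsHead]

theorem pvSplitCh_append (f cs' : List Char) (h : ':' ∉ f) :
    pvSplitCh (f ++ ':' :: cs') = f :: pvSplitCh cs' := by
  induction f with
  | nil => simp [pvSplitCh]
  | cons c rest ih =>
    have hc : c ≠ ':' := fun hh => h (hh ▸ List.mem_cons_self)
    have hr : ':' ∉ rest := fun hh => h (List.mem_cons_of_mem _ hh)
    simp [pvSplitCh, hc, ih hr, pvConsHead]

theorem pyGet_neg_one (l : List Char) (h : l ≠ []) :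
    PySem.List.pyGet? l (-1) = l.getLast? := by
  have hl : 0 < l.length := List.length_pos_iff.mpr h
  unfold PySem.List.pyGet? PySem.List.pyIdx?
  rw [if_neg (by omega), if_pos (by push_cast; omega)]
  rw [List.getLast?_eq_getElem?]
  simp

theorem slice_neg_one (l : List Char) :
    PySem.List.slice l none (some (-1)) = l.dropLast := by
  unfold PySem.List.slice PySem.List.clampIdx
  rcases l with _ | ⟨c, rest⟩
  · rfl
  · simp only []
    rw [if_pos (by omega), if_neg (by simp only [List.length_cons]; push_cast; omega)]
    rw [List.dropLast_eq_take, List.drop_zero]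
    congr 1
    simp only [List.length_cons]
    push_cast
    omega

-- evaluate A's step on a fragment not ending in '\'
theorem stepA_no_esc (output : List (List Char)) (j : Bool) (frag : List Char)
    (h : frag.getLast? ≠ some '\\') :
    parseA_step (output, j) frag =
      (if j then pvUpdLast output (':' :: frag) else output ++ [frag], false) := by
  rcases hf : frag with _ | ⟨c, rest⟩
  · cases j <;> simp [parseA_step]
  · have hg : PySem.List.pyGet? (c :: rest) (-1) = (c :: rest).getLast? :=
      pyGet_neg_one _ (by simp)
    have hb : ((PySem.List.pyGet? (c :: rest) (-1) == some '\\')) = false := by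
      rw [hg]; rw [hf] at h; simpa using h
    cases j <;> simp [parseA_step, hb]

-- evaluate A's step on a fragment ending in '\'
theorem stepA_esc (output : List (List Char)) (j : Bool) (frag : List Char)
    (h : frag.getLast? = some '\\') :
    parseA_step (output, j) frag =
      (if j then pvUpdLast output (':' :: frag.dropLast) else output ++ [frag.dropLast], true) := by
  have hne : frag ≠ [] := by intro hh; rw [hh] at h; simp at h
  have hg : (PySem.List.pyGet? frag (-1) == some '\\') = true := by
    rw [pyGet_neg_one _ hne, h]; rfl
  have hemp : frag.isEmpty = false := by simpa [List.isEmpty_iff] using hne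
  cases j <;> simp [parseA_step, hg, hemp, slice_neg_one]

theorem pvUpdLast_concat (xs : List (List Char)) (y s : List Char) :
    pvUpdLast (xs ++ [y]) s = xs ++ [y ++ s] := by
  simp [pvUpdLast]

-- step-shape lemmas for B's scan (each is one equation of parse_py_alt_go)
theorem goB_nil (cur : List Char) (comps : List (List Char)) :
    parse_py_alt_go [] cur comps = comps ++ [cur] := by simp [parse_py_alt_go]
theorem goB_b1 (cur : List Char) (comps : List (List Char)) :
    parse_py_alt_go ['\\'] cur comps = comps ++ [cur] := by simp [parse_py_alt_go]
theorem goB_esc (rest cur : List Char) (comps : List (List Char)) :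
    parse_py_alt_go ('\\' :: ':' :: rest) cur comps = parse_py_alt_go rest (cur ++ [':']) comps := by
  simp [parse_py_alt_go]
theorem goB_colon (rest cur : List Char) (comps : List (List Char)) :
    parse_py_alt_go (':' :: rest) cur comps = parse_py_alt_go rest [] (comps ++ [cur]) := by
  simp [parse_py_alt_go]
theorem goB_other (c : Char) (rest cur : List Char) (comps : List (List Char))
    (h1 : c ≠ ':') (h2 : c ≠ '\\') :
    parse_py_alt_go (c :: rest) cur comps = parse_py_alt_go rest (cur ++ [c]) comps := by
  rw [parse_py_alt_go.eq_def]
  simp [h2]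
theorem goB_b_other (d : Char) (rest cur : List Char) (comps : List (List Char)) (hd : d ≠ ':') :
    parse_py_alt_go ('\\' :: d :: rest) cur comps =
      parse_py_alt_go (d :: rest) (cur ++ ['\\']) comps := by
  rw [parse_py_alt_go.eq_def]
  simp [hd]

-- B's scan over a colon-free suffix
theorem goB_no_colon (l : List Char) (h : ':' ∉ l) : ∀ cur comps,
    parse_py_alt_go l cur comps =
      if l.getLast? = some '\\' then comps ++ [cur ++ l.dropLast] else comps ++ [cur ++ l] := by
  induction l with
  | nil => intro cur comps; simp [goB_nil]
  | cons c rest ih =>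
    intro cur comps
    have hc : c ≠ ':' := fun hh => h (hh ▸ List.mem_cons_self)
    have hr : ':' ∉ rest := fun hh => h (List.mem_cons_of_mem _ hh)
    by_cases hcb : c = '\\'
    · subst hcb
      cases rest with
      | nil => rw [goB_b1]; simp
      | cons d tail =>
        have hd : d ≠ ':' := fun hh => hr (hh ▸ List.mem_cons_self)
        rw [goB_b_other d tail cur comps hd, ih hr]
        by_cases hl : (d :: tail).getLast? = some '\\' <;>
          simp [hl, List.getLast?_cons_cons]
    · rw [goB_other c rest cur comps hc hcb]
      cases rest with
      | nil => rw [goB_nil]; simp [hcb]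
      | cons d tail =>
        rw [ih hr]
        by_cases hl : (d :: tail).getLast? = some '\\' <;>
          simp [hl, List.getLast?_cons_cons]

-- B's scan over one colon-terminated chunk
theorem goB_chunk (f : List Char) (h : ':' ∉ f) : ∀ (cs' cur : List Char) (comps : List (List Char)),
    parse_py_alt_go (f ++ ':' :: cs') cur comps =
      if f.getLast? = some '\\'
      then parse_py_alt_go cs' (cur ++ f.dropLast ++ [':']) comps
      else parse_py_alt_go cs' [] (comps ++ [cur ++ f]) := by
  induction f with
  | nil => intro cs' cur comps; simpa using goB_colon cs' cur comps
  | cons c rest ih =>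
    intro cs' cur comps
    have hc : c ≠ ':' := fun hh => h (hh ▸ List.mem_cons_self)
    have hr : ':' ∉ rest := fun hh => h (List.mem_cons_of_mem _ hh)
    by_cases hcb : c = '\\'
    · subst hcb
      cases rest with
      | nil => rw [show (['\\'] ++ ':' :: cs' : List Char) = '\\' :: ':' :: cs' from rfl, goB_esc]; simp
      | cons d tail =>
        have hd : d ≠ ':' := fun hh => hr (hh ▸ List.mem_cons_self)
        rw [show (('\\' :: d :: tail) ++ ':' :: cs' : List Char) = '\\' :: d :: (tail ++ ':' :: cs') from rfl,
            goB_b_other d (tail ++ ':' :: cs') cur comps hd,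
            show (d :: (tail ++ ':' :: cs') : List Char) = (d :: tail) ++ ':' :: cs' from rfl,
            ih hr]
        by_cases hl : (d :: tail).getLast? = some '\\' <;>
          simp [hl, List.getLast?_cons_cons]
    · rw [show ((c :: rest) ++ ':' :: cs' : List Char) = c :: (rest ++ ':' :: cs') from rfl,
          goB_other c (rest ++ ':' :: cs') cur comps hc hcb,
          ih hr]
      cases rest with
      | nil => simp [hcb]
      | cons d tail =>
        by_cases hl : (d :: tail).getLast? = some '\\' <;>
          simp [hl, List.getLast?_cons_cons]

-- split a list at its first colon
theorem exists_chunk (l : List Char) (h : ':' ∈ l) :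
    ∃ f cs', l = f ++ ':' :: cs' ∧ ':' ∉ f := by
  induction l with
  | nil => cases h
  | cons c rest ih =>
    by_cases hc : c = ':'
    · exact ⟨[], rest, by simp [hc], by simp⟩
    · have hr : ':' ∈ rest := by
        rcases List.mem_cons.mp h with h1 | h2
        · exact absurd h1.symm hc
        · exact h2
      obtain ⟨f, cs', hEq, hf⟩ := ih hr
      exact ⟨c :: f, cs', by rw [hEq]; rfl, by simp [hf, Ne.symm hc]⟩

-- the main correspondence: B's scan equals A's fold over the colon-split fragments
theorem main_lemma (n : Nat) : ∀ l : List Char, l.length ≤ n →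
    (∀ comps, parse_py_alt_go l [] comps =
        ((pvSplitCh l).foldl parseA_step (comps, false)).1) ∧
    (∀ comps last, parse_py_alt_go l (last ++ [':']) comps =
        ((pvSplitCh l).foldl parseA_step (comps ++ [last], true)).1) := by
  induction n with
  | zero =>
    intro l hl
    have : l = [] := List.length_eq_zero_iff.mp (Nat.le_zero.mp hl)
    subst this
    constructor
    · intro comps
      rw [goB_nil, pvSplitCh]
      simp [List.foldl, stepA_no_esc _ false [] (by simp)]
    · intro comps last
      rw [goB_nil, pvSplitCh]
      simp [List.foldl, stepA_no_esc _ true [] (by simp), pvUpdLast_concat]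
  | succ n ih =>
    intro l hl
    by_cases hmem : ':' ∈ l
    · obtain ⟨f, cs', rfl, hf⟩ := exists_chunk l hmem
      have hlen : cs'.length ≤ n := by
        have := hl
        simp [List.length_append] at this
        omega
      have iha := (ih cs' hlen).1
      have ihb := (ih cs' hlen).2
      rw [pvSplitCh_append f cs' hf]
      constructor
      · intro comps
        rw [goB_chunk f hf cs' [] comps]
        by_cases hfl : f.getLast? = some '\\'
        · rw [if_pos hfl, List.foldl_cons, stepA_esc comps false f hfl]
          simp only [if_neg (Bool.false_ne_true)]
          simpa using ihb comps f.dropLast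
        · rw [if_neg hfl, List.foldl_cons, stepA_no_esc comps false f hfl]
          simp only [if_neg (Bool.false_ne_true)]
          simpa using iha (comps ++ [f])
      · intro comps last
        rw [goB_chunk f hf cs' (last ++ [':']) comps]
        by_cases hfl : f.getLast? = some '\\'
        · rw [if_pos hfl, List.foldl_cons, stepA_esc (comps ++ [last]) true f hfl]
          simp only [pvUpdLast_concat]
          have := ihb comps (last ++ ':' :: f.dropLast)
          rw [show (last ++ [':'] ++ f.dropLast ++ [':'] : List Char)
                = (last ++ ':' :: f.dropLast) ++ [':'] by simp]
          simpa using this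
        · rw [if_neg hfl, List.foldl_cons, stepA_no_esc (comps ++ [last]) true f hfl]
          simp only [pvUpdLast_concat]
          have := iha (comps ++ [last ++ ':' :: f])
          simpa using this
    · constructor
      · intro comps
        rw [goB_no_colon l hmem [] comps, pvSplitCh_no_colon l hmem]
        by_cases hfl : l.getLast? = some '\\'
        · rw [if_pos hfl, List.foldl_cons, stepA_esc comps false l hfl]
          simp
        · rw [if_neg hfl, List.foldl_cons, stepA_no_esc comps false l hfl]
          simp
      · intro comps last
        rw [goB_no_colon l hmem (last ++ [':']) comps, pvSplitCh_no_colon l hmem]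
        by_cases hfl : l.getLast? = some '\\'
        · rw [if_pos hfl, List.foldl_cons, stepA_esc (comps ++ [last]) true l hfl]
          simp [pvUpdLast_concat]
        · rw [if_neg hfl, List.foldl_cons, stepA_no_esc (comps ++ [last]) true l hfl]
          simp [pvUpdLast_concat]

-- ===== VERDICT (by name: the statement is the Claim_ definition above) =====
theorem parse_py_spec : Claim_equal_parse_py := by
  intro arg _
  unfold Spec_parse_py parse_py parse_py_alt
  rw [splitOn_eq_pvSplitCh]
  rw [(main_lemma arg.toList.length arg.toList le_rfl).1 []]
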